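-- pv_equiv track=rewrite | github.com/sunday-funday/aigorithm | dooyub/programmers/42888.py | solution
-- ===== SOURCE A (Python) =====
-- def solution(record):
-- 	answer = []
-- 	user = {}
--
-- 	for i in record:
-- 		split = i.split()
-- 		if split[0] == "Enter" or split[0] == "Change":
-- 			user[split[1]] = split[2]
--
-- 	for i in record:
-- 		split = i.split()
-- 		if split[0] == "Enter":
-- 			answer.append(f'{user[split[1]]}님이 들어왔습니다.')
-- 		elif split[0] == "Leave":
-- 			answer.append(f'{user[split[1]]}님이 나갔습니다.')
--
-- 	return answer
-- ===== SOURCE B (Python) =====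
-- def solution(record):
--     user = {}
--     events = []
--     for line in record:
--         t = line.split()
--         if t[0] == "Enter" or t[0] == "Change":
--             user[t[1]] = t[2]
--         if t[0] == "Enter" or t[0] == "Leave":
--             events.append((t[0], t[1]))
--     return [user[uid] + ("님이 들어왔습니다." if act == "Enter" else "님이 나갔습니다.")
--             for act, uid in events]
-- ===== Notes on version B (the rewrite author's own statement) =====
-- stated objective: simpler
-- what changed: B makes a single pass over record, building the nickname map and an (action, uid) event list together, then renders the messages from the event list, instead of A's two full passes over record with re-splitting of every line.
import Mathlib
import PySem

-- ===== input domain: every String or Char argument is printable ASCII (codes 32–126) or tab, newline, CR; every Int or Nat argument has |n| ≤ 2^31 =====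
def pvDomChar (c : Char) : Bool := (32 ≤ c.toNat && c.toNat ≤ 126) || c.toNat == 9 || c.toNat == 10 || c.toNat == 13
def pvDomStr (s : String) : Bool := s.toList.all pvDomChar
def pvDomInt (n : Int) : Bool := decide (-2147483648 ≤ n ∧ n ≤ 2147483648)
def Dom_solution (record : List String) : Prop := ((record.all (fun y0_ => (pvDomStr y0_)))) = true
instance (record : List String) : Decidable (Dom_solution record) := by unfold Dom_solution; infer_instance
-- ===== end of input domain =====

-- B replaces A's two passes over `record` (splitting each line twice) by one pass that
-- builds the nickname map and an (action, uid) event list together, then renders from the events.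

-- ===== PORT A =====
-- first loop body: user[split[1]] = split[2] on Enter/Change
def solAStep1 (user : PySem.Dict String String) (i : String) : PySem.Dict String String :=
  let s := PySem.Str.split₀ i
  if (PySem.List.pyGet? s 0).getD "" == "Enter" || (PySem.List.pyGet? s 0).getD "" == "Change" then
    user.insert ((PySem.List.pyGet? s 1).getD "") ((PySem.List.pyGet? s 2).getD "")
  else user

-- second loop body: append the message (dict/index lookups total via getD; Pre_ excludes the raising inputs)
def solAStep2 (user : PySem.Dict String String) (answer : List String) (i : String) : List String :=
  let s := PySem.Str.split₀ i
  if (PySem.List.pyGet? s 0).getD "" == "Enter" then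
    answer ++ [user.getD ((PySem.List.pyGet? s 1).getD "") "" ++ "님이 들어왔습니다."]
  else if (PySem.List.pyGet? s 0).getD "" == "Leave" then
    answer ++ [user.getD ((PySem.List.pyGet? s 1).getD "") "" ++ "님이 나갔습니다."]
  else answer

def solution (record : List String) : List String :=
  let user := record.foldl solAStep1 PySem.Dict.empty
  record.foldl (solAStep2 user) []

-- ===== PORT B =====
-- single loop body: update the map and collect (action, uid) events
def solBStep (st : PySem.Dict String String × List (String × String)) (line : String) :
    PySem.Dict String String × List (String × String) :=
  let t := PySem.Str.split₀ line
  let t0 := (PySem.List.pyGet? t 0).getD ""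
  let st1 := if t0 == "Enter" || t0 == "Change" then
      (st.1.insert ((PySem.List.pyGet? t 1).getD "") ((PySem.List.pyGet? t 2).getD ""), st.2)
    else st
  if t0 == "Enter" || t0 == "Leave" then
    (st1.1, st1.2 ++ [(t0, (PySem.List.pyGet? t 1).getD "")])
  else st1

-- comprehension body
def solBMsg (user : PySem.Dict String String) (e : String × String) : String :=
  user.getD e.2 "" ++ (if e.1 == "Enter" then "님이 들어왔습니다." else "님이 나갔습니다.")

def solution_alt (record : List String) : List String :=
  let st := record.foldl solBStep (PySem.Dict.empty, [])
  st.2.map (solBMsg st.1)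

-- ===== PRECONDITION & SPEC =====
-- Pre_ excludes exactly the inputs on which Python A raises: a line that splits to no words
-- (IndexError at split[0]), an Enter/Change line with fewer than 3 words (IndexError), a Leave
-- line with fewer than 2 words (IndexError), and a Leave whose uid no Enter/Change line names
-- (KeyError in the second loop).
def Pre_solution (record : List String) : Prop :=
  ∀ l ∈ record,
    (PySem.Str.split₀ l) ≠ [] ∧
    (((PySem.Str.split₀ l).headD "" = "Enter" ∨ (PySem.Str.split₀ l).headD "" = "Change") →
       3 ≤ (PySem.Str.split₀ l).length) ∧
    ((PySem.Str.split₀ l).headD "" = "Leave" →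
       2 ≤ (PySem.Str.split₀ l).length ∧
       (PySem.Str.split₀ l).getD 1 "" ∈ record.filterMap (fun l' =>
         if ((PySem.Str.split₀ l').headD "" = "Enter" ∨ (PySem.Str.split₀ l').headD "" = "Change") ∧
             3 ≤ (PySem.Str.split₀ l').length
         then (PySem.Str.split₀ l')[1]? else none))
instance (record : List String) : Decidable (Pre_solution record) := by unfold Pre_solution; infer_instance

def pvWitness_solution : List String := ["Enter u1 Muzi", "Enter u2 Frodo", "Leave u1", "Change u2 Ryan"]

def Spec_solution (record : List String) (out : List String) : Prop := out = solution_alt record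
instance (record : List String) (out : List String) : Decidable (Spec_solution record out) := by unfold Spec_solution; infer_instance

-- ===== CLAIM (what is proved, stated in full; the proofs are below) =====
def Claim_equal_solution : Prop := ∀ (record : List String), Dom_solution record → Pre_solution record → Spec_solution record (solution record)

-- ===== LEMMAS AND PROOFS =====

-- the events B collects, as a flatMap over record
def evOf (line : String) : List (String × String) :=
  let t := PySem.Str.split₀ line
  let t0 := (PySem.List.pyGet? t 0).getD ""
  if t0 == "Enter" || t0 == "Leave" then [(t0, (PySem.List.pyGet? t 1).getD "")] else []

lemma solBStep_fold (rec : List String) (d : PySem.Dict String String) (es : List (String × String)) :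
    rec.foldl solBStep (d, es) = (rec.foldl solAStep1 d, es ++ rec.flatMap evOf) := by
  induction rec generalizing d es with
  | nil => simp
  | cons l rest ih =>
    simp only [List.foldl_cons, List.flatMap_cons]
    rw [show solBStep (d, es) l =
        (solAStep1 d l, es ++ evOf l) by
      simp only [solBStep, solAStep1, evOf]
      split_ifs <;> simp_all]
    rw [ih]
    simp

lemma solAStep2_fold (rec : List String) (u : PySem.Dict String String) (ans : List String) :
    rec.foldl (solAStep2 u) ans = ans ++ (rec.flatMap evOf).map (solBMsg u) := by
  induction rec generalizing ans with
  | nil => simp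
  | cons l rest ih =>
    simp only [List.foldl_cons, List.flatMap_cons, List.map_append]
    rw [ih]
    have : solAStep2 u ans l = ans ++ (evOf l).map (solBMsg u) := by
      simp only [solAStep2, evOf]
      split_ifs with h1 h2 <;> simp_all [solBMsg]
    rw [this, List.append_assoc]

-- ===== VERDICT (by name: the statement is the Claim_ definition above) =====
theorem solution_spec : Claim_equal_solution := by
  intro record _ _
  unfold Spec_solution solution solution_alt
  rw [solBStep_fold, solAStep2_fold]
  simp
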